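-- pv_equiv track=rewrite | github.com/Iamsam45x/Qrealm1 | QRealm1-main/backend/app/db.py | _prepare_sql_params
-- ===== SOURCE A (Python) =====
-- from typing import Any, Generator, List, Optional, Tuple
--
-- def _prepare_sql_params(statement: str, parameters: Tuple) -> Tuple[str, dict]:
--     """
--     Convert '?' placeholders to named binds for SQLAlchemy text().
--     Provides compatibility with legacy code using '?' syntax.
--     """
--     if not parameters:
--         return statement, {}
--     parts = statement.split("?")
--     expected = len(parts) - 1
--     if expected != len(parameters):
--         raise ValueError(
--             f"SQL placeholder mismatch: {expected} '?' in query, "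
--             f"{len(parameters)} parameters (snippet: {statement[:120]!r})"
--         )
--     keys = [f"p{i}" for i in range(len(parameters))]
--     out: List[str] = []
--     for i, part in enumerate(parts[:-1]):
--         out.append(part)
--         out.append(f":{keys[i]}")
--     out.append(parts[-1])
--     bind = {keys[i]: parameters[i] for i in range(len(parameters))}
--     return "".join(out), bind
-- ===== SOURCE B (Python) =====
-- def _prepare_sql_params(statement, parameters):
--     """
--     Convert '?' placeholders to named binds for SQLAlchemy text().
--     Single left-to-right character scan instead of split/interleave.
--     """
--     if not parameters:
--         return statement, {}
--     expected = statement.count("?")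
--     if expected != len(parameters):
--         raise ValueError(
--             f"SQL placeholder mismatch: {expected} '?' in query, "
--             f"{len(parameters)} parameters (snippet: {statement[:120]!r})"
--         )
--     chunks = []
--     n = 0
--     for ch in statement:
--         if ch == "?":
--             chunks.append(":p" + str(n))
--             n += 1
--         else:
--             chunks.append(ch)
--     bind = {"p" + str(i): v for i, v in enumerate(parameters)}
--     return "".join(chunks), bind
-- ===== Notes on version B (the rewrite author's own statement) =====
-- stated objective: alternative
-- what changed: Replaced A's split-on-'?' / interleave-parts-with-keys list construction by a single left-to-right character scan that emits ':p<counter>' at each '?', with the bind dict built from enumerate(parameters).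
import Mathlib
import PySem

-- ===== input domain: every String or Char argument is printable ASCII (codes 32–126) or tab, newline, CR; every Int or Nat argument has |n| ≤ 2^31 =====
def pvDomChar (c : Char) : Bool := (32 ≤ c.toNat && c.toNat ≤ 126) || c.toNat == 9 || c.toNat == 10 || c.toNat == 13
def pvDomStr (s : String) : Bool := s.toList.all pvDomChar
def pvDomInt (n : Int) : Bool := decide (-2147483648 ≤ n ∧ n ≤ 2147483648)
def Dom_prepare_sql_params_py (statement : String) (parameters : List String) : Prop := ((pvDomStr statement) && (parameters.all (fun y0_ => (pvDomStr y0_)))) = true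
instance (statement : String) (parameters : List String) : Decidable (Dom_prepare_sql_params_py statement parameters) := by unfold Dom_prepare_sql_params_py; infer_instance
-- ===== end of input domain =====

-- B replaces A's split-on-'?'/interleave-with-keys construction by a single left-to-right
-- character scan with a placeholder counter (objective: alternative; same linear cost).

-- ===== PORT A =====
-- split/interleave: parts = statement.split('?'); out = parts[0], ':p0', parts[1], ':p1', …, parts[-1]
def prepare_sql_params_py (statement : String) (parameters : List String) : String × (List (String × String)) :=
  if parameters = [] then (statement, [])
  else
    let parts : List String := (PySem.Str.split? statement "?").getD []   -- sep "?" ≠ "", never none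
    let expected : Int := PySem.List.len parts - 1
    if expected ≠ PySem.List.len parameters then
      (statement, [])   -- Python raises ValueError here; excluded by Pre_
    else
      let keys : List String := (PySem.List.pyRange 0 (PySem.List.len parameters) 1).map
        (fun i => "p" ++ PySem.Int.toStr i)
      let out : List String := (PySem.List.enumerate (PySem.List.slice parts none (some (-1)))).foldl
        (fun acc ip => acc ++ [ip.2] ++ [":" ++ PySem.List.pyGetD keys ip.1 ""]) []
      let out := out ++ [PySem.List.pyGetD parts (-1) ""]
      let bind := ((PySem.List.pyRange 0 (PySem.List.len parameters) 1).foldl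
        (fun d i => d.insert ("p" ++ PySem.Int.toStr i) (PySem.List.pyGetD parameters i ""))
        (PySem.Dict.empty : PySem.Dict String String))
      (PySem.Str.join "" out, bind.items)

-- ===== PORT B =====
-- one pass over the characters: each '?' becomes ':p<counter>', counter increments
def prepare_sql_params_py_alt (statement : String) (parameters : List String) : String × (List (String × String)) :=
  if parameters = [] then (statement, [])
  else
    let expected : Nat := PySem.Str.count statement "?"
    if expected ≠ parameters.length then
      (statement, [])   -- Python raises the identical ValueError here; excluded by Pre_
    else
      let scan := statement.toList.foldl
        (fun (st : List (List Char) × Nat) ch =>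
          if ch = '?' then (st.1 ++ [':' :: 'p' :: PySem.Int.toChars (st.2 : Int)], st.2 + 1)
          else (st.1 ++ [[ch]], st.2))
        ([], 0)
      let bind := ((PySem.List.enumerate parameters).foldl
        (fun d iv => d.insert ("p" ++ PySem.Int.toStr iv.1) iv.2)
        (PySem.Dict.empty : PySem.Dict String String))
      (String.ofList (PySem.Chars.join [] scan.1), bind.items)

-- ===== PRECONDITION & SPEC =====
-- Pre_ excludes exactly the inputs where A raises ValueError: a non-empty parameter tuple whose
-- length differs from the number of '?' placeholders in the statement.
def Pre_prepare_sql_params_py (statement : String) (parameters : List String) : Prop :=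
  parameters = [] ∨ PySem.Str.count statement "?" = parameters.length
instance (statement : String) (parameters : List String) : Decidable (Pre_prepare_sql_params_py statement parameters) := by unfold Pre_prepare_sql_params_py; infer_instance

def pvWitness_prepare_sql_params_py : String × List String := ("SELECT * FROM t WHERE a = ? AND b = ?", ["1", "x"])

def Spec_prepare_sql_params_py (statement : String) (parameters : List String) (out : String × (List (String × String))) : Prop := out = prepare_sql_params_py_alt statement parameters
instance (statement : String) (parameters : List String) (out : String × (List (String × String))) : Decidable (Spec_prepare_sql_params_py statement parameters out) := by unfold Spec_prepare_sql_params_py; infer_instance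

-- ===== CLAIM (what is proved, stated in full; the proofs are below) =====
def Claim_equal_prepare_sql_params_py : Prop := ∀ (statement : String) (parameters : List String), Dom_prepare_sql_params_py statement parameters → Pre_prepare_sql_params_py statement parameters → Spec_prepare_sql_params_py statement parameters (prepare_sql_params_py statement parameters)

-- ===== LEMMAS AND PROOFS =====

def splitQ : List Char → List (List Char)
  | [] => [[]]
  | c :: rest =>
    if c = '?' then [] :: splitQ rest
    else
      match splitQ rest with
      | [] => [[c]]
      | p :: ps => (c :: p) :: ps

def prepFirst (x : List Char) : List (List Char) → List (List Char)
  | [] => [x]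
  | p :: ps => (x ++ p) :: ps

theorem splitQ_ne_nil (cs : List Char) : splitQ cs ≠ [] := by
  cases cs with
  | nil => simp [splitQ]
  | cons c rest =>
    simp only [splitQ]
    split
    · simp
    · cases h : splitQ rest <;> simp

theorem prepFirst_nil_of_ne (l : List (List Char)) (h : l ≠ []) : prepFirst [] l = l := by
  cases l with
  | nil => exact absurd rfl h
  | cons p ps => simp [prepFirst]

theorem splitOn_go_eq' : ∀ (fuel : Nat) (l cur : List Char) (acc : List (List Char)),
    l.length < fuel →
    PySem.Chars.splitOn.go ['?'] fuel l cur acc = acc.reverse ++ prepFirst cur.reverse (splitQ l) := by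
  intro fuel
  induction fuel with
  | zero => intro l cur acc h; omega
  | succ f ih =>
    intro l cur acc h
    cases l with
    | nil =>
      simp [PySem.Chars.splitOn.go, splitQ, prepFirst]
    | cons c rest =>
      have hlen : rest.length < f := by simpa using Nat.lt_of_succ_lt_succ h
      by_cases hc : c = '?'
      · subst hc
        simp only [PySem.Chars.splitOn.go, List.isPrefixOf, BEq.rfl, Bool.true_and,
          List.isPrefixOf_nil_left, if_pos, List.length_cons, List.drop_succ_cons, List.drop_zero]
        simp only [List.length_nil, List.drop_zero]
        rw [ih rest [] (cur.reverse :: acc) hlen]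
        rw [show ([] : List Char).reverse = [] from rfl, prepFirst_nil_of_ne _ (splitQ_ne_nil rest)]
        simp [splitQ, prepFirst]
      · have hpre : (['?'].isPrefixOf (c :: rest)) = false := by
          simp [List.isPrefixOf]
          intro hh; exact hc hh.symm
        simp only [PySem.Chars.splitOn.go, hpre, if_neg, Bool.false_eq_true, not_false_iff]
        rw [ih rest (c :: cur) acc hlen]
        have : splitQ (c :: rest) = match splitQ rest with
          | [] => [[c]]
          | p :: ps => (c :: p) :: ps := by simp [splitQ, hc]
        rw [this]
        cases hs : splitQ rest with
        | nil => exact absurd hs (splitQ_ne_nil rest)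
        | cons p ps => simp [prepFirst]

theorem splitOn_eq_splitQ (cs : List Char) : PySem.Chars.splitOn cs ['?'] = splitQ cs := by
  unfold PySem.Chars.splitOn
  rw [splitOn_go_eq' (cs.length + 1) cs [] [] (by omega)]
  simp [prepFirst_nil_of_ne _ (splitQ_ne_nil cs)]

theorem count_go_eq : ∀ (fuel : Nat) (l : List Char) (acc : Nat),
    l.length ≤ fuel →
    PySem.Chars.count.go ['?'] fuel l acc = acc + l.countP (· == '?') := by
  intro fuel
  induction fuel with
  | zero =>
    intro l acc h
    have : l = [] := List.eq_nil_of_length_eq_zero (Nat.le_zero.mp h)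
    subst this
    simp [PySem.Chars.count.go]
  | succ f ih =>
    intro l acc h
    cases l with
    | nil => simp [PySem.Chars.count.go]
    | cons c rest =>
      have hlen : rest.length ≤ f := by simpa using Nat.succ_le_succ_iff.mp h
      by_cases hc : c = '?'
      · subst hc
        simp only [PySem.Chars.count.go, List.isPrefixOf, BEq.rfl, Bool.true_and,
          List.isPrefixOf_nil_left, if_pos, List.length_cons, List.drop_succ_cons, List.drop_zero]
        simp only [List.length_nil, List.drop_zero]
        rw [ih rest (acc + 1) hlen]
        simp [List.countP_cons]
        omega
      · have hpre : (['?'].isPrefixOf (c :: rest)) = false := by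
          simp [List.isPrefixOf]
          intro hh; exact hc hh.symm
        simp only [PySem.Chars.count.go, hpre, Bool.false_eq_true, if_neg, not_false_iff]
        rw [ih rest acc hlen]
        simp [List.countP_cons, hc]

theorem count_eq_countP (cs : List Char) : PySem.Chars.count cs ['?'] = cs.countP (· == '?') := by
  unfold PySem.Chars.count
  rw [if_neg (by simp)]
  rw [count_go_eq cs.length cs 0 (le_refl _)]
  simp

theorem length_splitQ (cs : List Char) : (splitQ cs).length = cs.countP (· == '?') + 1 := by
  induction cs with
  | nil => simp [splitQ]
  | cons c rest ih =>
    by_cases hc : c = '?'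
    · subst hc; simp [splitQ, List.countP_cons, ih]
    · simp only [splitQ, if_neg hc]
      cases hs : splitQ rest with
      | nil => exact absurd hs (splitQ_ne_nil rest)
      | cons p ps =>
        rw [hs] at ih
        simp [List.countP_cons, hc, ← ih]

def interQ : List (List Char) → Int → List Char
  | [], _ => []
  | [p], _ => p
  | p :: q :: ps, i => p ++ (':' :: 'p' :: PySem.Int.toChars i) ++ interQ (q :: ps) (i + 1)

def scanQ : List Char → Nat → List Char
  | [], _ => []
  | c :: rest, i =>
    if c = '?' then (':' :: 'p' :: PySem.Int.toChars (i : Int)) ++ scanQ rest (i + 1)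
    else c :: scanQ rest i

theorem interQ_splitQ_eq_scanQ : ∀ (cs : List Char) (i : Nat),
    interQ (splitQ cs) (i : Int) = scanQ cs i := by
  intro cs
  induction cs with
  | nil => intro i; simp [splitQ, interQ, scanQ]
  | cons c rest ih =>
    intro i
    by_cases hc : c = '?'
    · subst hc
      simp only [splitQ, if_pos rfl, scanQ, if_pos rfl, if_true]
      cases hs : splitQ rest with
      | nil => exact absurd hs (splitQ_ne_nil rest)
      | cons p ps =>
        have := ih (i + 1)
        rw [hs] at this
        simp only [interQ, List.nil_append]
        rw [show ((i : Int) + 1) = ((i + 1 : Nat) : Int) by push_cast; ring, this]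
    · simp only [splitQ, if_neg hc, scanQ, if_neg hc]
      cases hs : splitQ rest with
      | nil => exact absurd hs (splitQ_ne_nil rest)
      | cons p ps =>
        have := ih i
        rw [hs] at this
        cases ps with
        | nil => simp [interQ] at this ⊢; simp [this]
        | cons q qs => simp only [interQ, List.cons_append] at this ⊢; simp [this]

theorem join_nil_eq_flatten (l : List (List Char)) : PySem.Chars.join [] l = l.flatten := by
  induction l with
  | nil => simp [PySem.Chars.join_nil]
  | cons p ps ih =>
    cases ps with
    | nil => simp [PySem.Chars.join_singleton]
    | cons q qs =>
      rw [PySem.Chars.join_cons_cons, ih]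
      simp

def interAux : List (List Char) → Int → List Char
  | [], _ => []
  | p :: ps, i => p ++ (':' :: 'p' :: PySem.Int.toChars i) ++ interAux ps (i + 1)

theorem interAux_last : ∀ (qs : List (List Char)) (lastp : List Char) (i : Int),
    interAux qs i ++ lastp = interQ (qs ++ [lastp]) i := by
  intro qs
  induction qs with
  | nil => intro lastp i; simp [interAux, interQ]
  | cons p ps ih =>
    intro lastp i
    cases ps with
    | nil => simp [interAux, interQ]
    | cons q qs' =>
      have h2 := ih lastp (i + 1)
      simp only [interAux, interQ, List.cons_append, List.append_assoc] at h2 ⊢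
      rw [h2]

theorem B_fold : ∀ (cs : List Char) (i : Nat) (chunks : List (List Char)),
    (cs.foldl (fun (st : List (List Char) × Nat) ch =>
        if ch = '?' then (st.1 ++ [':' :: 'p' :: PySem.Int.toChars (st.2 : Int)], st.2 + 1)
        else (st.1 ++ [[ch]], st.2)) (chunks, i)).1.flatten
      = chunks.flatten ++ scanQ cs i := by
  intro cs
  induction cs with
  | nil => intro i chunks; simp [scanQ]
  | cons c rest ih =>
    intro i chunks
    by_cases hc : c = '?'
    · subst hc
      simp only [List.foldl_cons, if_pos rfl, if_true]
      rw [ih (i + 1) (chunks ++ [':' :: 'p' :: PySem.Int.toChars (i : Int)])]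
      simp [scanQ]
    · simp only [List.foldl_cons, if_neg hc]
      rw [ih i (chunks ++ [[c]])]
      simp [scanQ, hc]

theorem A_loop : ∀ (qs : List String) (i : Int) (acc : List String),
    (((PySem.List.enumerate qs i).foldl
        (fun acc ip => acc ++ [ip.2] ++ [":" ++ ("p" ++ PySem.Int.toStr ip.1)]) acc).map String.toList).flatten
      = (acc.map String.toList).flatten ++ interAux (qs.map String.toList) i := by
  intro qs
  induction qs with
  | nil => intro i acc; simp [PySem.List.enumerate_nil, interAux]
  | cons q qs' ih =>
    intro i acc
    rw [PySem.List.enumerate_cons, List.foldl_cons]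
    rw [ih (i + 1) (acc ++ [q] ++ [":" ++ ("p" ++ PySem.Int.toStr i)])]
    simp [interAux, PySem.Int.toList_toStr]

-- ===== VERDICT (by name: the statement is the Claim_ definition above) =====
theorem prepare_sql_params_py_spec : Claim_equal_prepare_sql_params_py := by
  intro statement parameters _ hpre
  unfold Spec_prepare_sql_params_py prepare_sql_params_py prepare_sql_params_py_alt
  by_cases hp : parameters = []
  · simp [hp]
  · simp only [if_neg hp]
    have hcount : PySem.Str.count statement "?" = parameters.length := by
      rcases hpre with h | h
      · exact absurd h hp
      · exact h
    have hcountP : statement.toList.countP (· == '?') = parameters.length := by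
      rw [PySem.Str.count_eq] at hcount
      rw [show ("?" : String).toList = ['?'] from rfl] at hcount
      rw [count_eq_countP] at hcount
      exact hcount
    -- the parts of statement.split('?')
    obtain ⟨ps, hps, hmap⟩ : ∃ ps, PySem.Str.split? statement "?" = some ps ∧
        ps.map String.toList = splitQ statement.toList := by
      have h := PySem.Str.split?_map statement "?"
      rw [show ("?" : String).toList = ['?'] from rfl] at h
      simp only [PySem.Chars.split?, List.isEmpty_cons, if_neg] at h
      rw [splitOn_eq_splitQ] at h
      cases hsp : PySem.Str.split? statement "?" with
      | none => rw [hsp] at h; simp at h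
      | some ps => rw [hsp] at h; simp at h; exact ⟨ps, rfl, h⟩
    rw [hps]
    simp only [Option.getD_some]
    have hlenps : ps.length = parameters.length + 1 := by
      have := length_splitQ statement.toList
      rw [← hmap, List.length_map] at this
      omega
    have hguardA : ¬ (PySem.List.len ps - 1 ≠ PySem.List.len parameters) := by
      simp only [PySem.List.len, hlenps]
      push_cast
      omega
    rw [if_neg hguardA, if_neg (by omega : ¬ (PySem.Str.count statement "?" ≠ parameters.length))]
    have hne : ps ≠ [] := by
      intro hnil
      rw [hnil] at hmap
      exact splitQ_ne_nil statement.toList hmap.symm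
    refine Prod.ext ?_ ?_
    · -- statement component
      apply String.toList_inj.mp
      rw [String.toList_ofList]
      rw [PySem.Str.toList_join]
      rw [show ("" : String).toList = [] from rfl]
      rw [join_nil_eq_flatten, join_nil_eq_flatten]
      rw [B_fold statement.toList 0 []]
      simp only [List.flatten_nil, List.nil_append]
      -- A side
      rw [PySem.List.slice_to_neg_one]
      have hdrop : ps.dropLast.length = parameters.length := by
        rw [List.length_dropLast, hlenps]; omega
      rw [PySem.List.foldl_congr_mem (PySem.List.enumerate ps.dropLast)
        (fun acc ip => acc ++ [ip.2] ++ [":" ++ PySem.List.pyGetD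
          ((PySem.List.pyRange 0 (PySem.List.len parameters) 1).map (fun i => "p" ++ PySem.Int.toStr i)) ip.1 ""])
        (fun acc ip => acc ++ [ip.2] ++ [":" ++ ("p" ++ PySem.Int.toStr ip.1)]) []
        (by
          intro acc ip hip
          rw [PySem.List.mem_enumerate_iff] at hip
          obtain ⟨k, hk, rfl⟩ := hip
          have hk' : (0 : Int) + k < PySem.List.len parameters := by
            simp only [PySem.List.len]
            rw [hdrop] at hk
            push_cast
            omega
          dsimp only
          rw [PySem.List.pyGetD_map_pyRange_of_nonneg _ _ _ _ (by positivity) hk'])]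
      rw [List.map_append, List.flatten_append]
      rw [A_loop ps.dropLast 0 []]
      simp only [List.map_nil, List.flatten_nil, List.nil_append]
      rw [PySem.List.pyGetD_neg_one ps "" hne]
      rw [List.map_singleton, List.flatten_cons, List.flatten_nil, List.append_nil]
      rw [interAux_last]
      rw [show ps.dropLast.map String.toList ++ [(ps.getLast hne).toList] =
          (ps.dropLast ++ [ps.getLast hne]).map String.toList by simp]
      rw [List.dropLast_append_getLast hne, hmap]
      rw [show (0 : Int) = ((0 : Nat) : Int) from rfl]
      exact interQ_splitQ_eq_scanQ statement.toList 0
    · -- bind component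
      rw [PySem.List.enumerate_eq_map_pyRange parameters ""]
      rw [List.foldl_map]
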